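-- pv_equiv track=rewrite | github.com/gersteinlab/SAMChain | SAMchain/queryDepth.py | col2parser
-- ===== SOURCE A (Python) =====
-- def col2parser(col2):
--     l2 = []
--     num2 = ""
--     for c2 in col2:
--         if c2 not in ':-':
--             if (c2 in 'NACTGactgn'):
--                 num2 = num2 + c2
--             else:
--                 l2.append([num2, c2])
--                 num2 = ""
--     return l2
-- ===== SOURCE B (Python) =====
-- def col2parser(col2):
--     # filter pass, then scan maximal base-runs by index spans (no running accumulator)
--     s = [c for c in col2 if c not in ':-']
--     out = []
--     i = 0
--     n = len(s)
--     while i < n: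
--         j = i
--         while j < n and s[j] in 'NACTGactgn':
--             j += 1
--         if j == n:
--             break  # trailing unterminated bases are discarded
--         out.append([''.join(s[i:j]), s[j]])
--         i = j + 1
--     return out
-- ===== Notes on version B (the rewrite author's own statement) =====
-- stated objective: alternative
-- what changed: A accumulates bases into a growing string and flushes it at each delimiter in one char-by-char pass; B first filters out the two ignored separator characters and then scans the remainder as index spans of maximal base runs, slicing each run with its following delimiter (a trailing unterminated run falls off naturally).
import Mathlib
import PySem

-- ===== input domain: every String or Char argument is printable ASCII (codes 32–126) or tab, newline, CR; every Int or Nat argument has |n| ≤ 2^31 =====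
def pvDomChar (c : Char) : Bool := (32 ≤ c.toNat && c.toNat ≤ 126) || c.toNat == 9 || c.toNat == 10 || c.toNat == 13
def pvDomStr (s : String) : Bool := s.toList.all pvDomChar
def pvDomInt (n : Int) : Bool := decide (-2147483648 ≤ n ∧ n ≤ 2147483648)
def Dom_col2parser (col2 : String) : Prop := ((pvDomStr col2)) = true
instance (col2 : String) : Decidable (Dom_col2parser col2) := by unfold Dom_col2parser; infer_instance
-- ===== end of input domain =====

-- B replaces A's accumulate-and-flush single pass by a filter pass plus a span scan
-- over maximal base runs (alternative decomposition, same output).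

-- ===== PORT A =====
-- literal transliteration of A: fold over the characters with state (l2, num2)
def col2parser (col2 : String) : List (List String) :=
  (col2.toList.foldl
    (fun (st : List (List String) × String) c2 =>
      if ¬ (c2 ∈ (":-" : String).toList) then
        if c2 ∈ ("NACTGactgn" : String).toList then
          (st.1, st.2.push c2)
        else
          (st.1 ++ [[st.2, String.ofList [c2]]], "")
      else st)
    ([], "")).1

-- ===== PORT B =====
def pvIsBase (c : Char) : Bool := decide (c ∈ ("NACTGactgn" : String).toList)

-- hand port of B's span scan: the inner `while s[j] in 'NACTGactgn'` advance is
-- takeWhile/dropWhile over the remaining suffix; `j == n` (no delimiter left) ends the scan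
def pvTokenize (cs : List Char) : List (List String) :=
  match h : cs.dropWhile pvIsBase with
  | [] => []
  | d :: r => [String.ofList (cs.takeWhile pvIsBase), String.ofList [d]] :: pvTokenize r
termination_by cs.length
decreasing_by
  have h1 : (cs.dropWhile pvIsBase).length ≤ cs.length := List.length_dropWhile_le pvIsBase cs
  rw [h] at h1; simp at h1; omega

def col2parser_alt (col2 : String) : List (List String) :=
  pvTokenize (col2.toList.filter (fun c => ¬ (c ∈ (":-" : String).toList)))

-- ===== PRECONDITION & SPEC =====
def Spec_col2parser (col2 : String) (out : List (List String)) : Prop := out = col2parser_alt col2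
instance (col2 : String) (out : List (List String)) : Decidable (Spec_col2parser col2 out) := by unfold Spec_col2parser; infer_instance

-- ===== CLAIM (what is proved, stated in full; the proofs are below) =====
def Claim_equal_col2parser : Prop := ∀ (col2 : String), Dom_col2parser col2 → Spec_col2parser col2 (col2parser col2)

-- ===== LEMMAS AND PROOFS =====

-- A's full step and its inner step (what A does to a character surviving the ':-' filter)
def pvStepA (st : List (List String) × String) (c2 : Char) : List (List String) × String :=
  if ¬ (c2 ∈ (":-" : String).toList) then
    if c2 ∈ ("NACTGactgn" : String).toList then (st.1, st.2.push c2)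
    else (st.1 ++ [[st.2, String.ofList [c2]]], "")
  else st

def pvStepB (st : List (List String) × String) (c2 : Char) : List (List String) × String :=
  if c2 ∈ ("NACTGactgn" : String).toList then (st.1, st.2.push c2)
  else (st.1 ++ [[st.2, String.ofList [c2]]], "")

lemma col2parser_eq_foldA (col2 : String) :
    col2parser col2 = (col2.toList.foldl pvStepA ([], "")).1 := rfl

-- A's fold over cs equals the inner step folded over the ':-'-filtered list
lemma foldA_eq_foldB (cs : List Char) (st : List (List String) × String) :
    cs.foldl pvStepA st
      = (cs.filter (fun c => ¬ (c ∈ (":-" : String).toList))).foldl pvStepB st := by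
  induction cs generalizing st with
  | nil => rfl
  | cons c rest ih =>
    rw [List.foldl_cons, List.filter_cons]
    by_cases h : c ∈ (":-" : String).toList
    · simp only [h, not_true_eq_false, decide_false, Bool.false_eq_true, if_false]
      rw [pvStepA, if_neg (not_not_intro h)]
      exact ih st
    · simp only [h, not_false_eq_true, decide_true, if_true]
      rw [List.foldl_cons, pvStepA, if_pos h]
      exact ih _

-- recursive description of the inner fold's first component
def pvTokAux (num : String) : List Char → List (List String)
  | [] => []
  | c :: r =>
    if pvIsBase c then pvTokAux (num.push c) r
    else [num, String.ofList [c]] :: pvTokAux "" r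

lemma foldB_fst (cs : List Char) (acc : List (List String)) (num : String) :
    (cs.foldl pvStepB (acc, num)).1 = acc ++ pvTokAux num cs := by
  induction cs generalizing acc num with
  | nil => simp [pvTokAux]
  | cons c rest ih =>
    rw [List.foldl_cons]
    by_cases h : pvIsBase c
    · rw [pvStepB, if_pos (by simpa [pvIsBase] using h), pvTokAux, if_pos h]
      exact ih acc (num.push c)
    · rw [pvStepB, if_neg (by simpa [pvIsBase] using h), pvTokAux, if_neg h]
      rw [ih, List.append_assoc]
      rfl

-- unfolding equations for pvTokenize through the dropWhile case split
lemma pvTokenize_of_drop_nil (cs : List Char) (h : cs.dropWhile pvIsBase = []) :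
    pvTokenize cs = [] := by
  rw [pvTokenize]; split
  · rfl
  · rename_i d r hd; rw [h] at hd; exact absurd hd (by simp)

lemma pvTokenize_of_drop_cons (cs : List Char) (d : Char) (r : List Char)
    (h : cs.dropWhile pvIsBase = d :: r) :
    pvTokenize cs = [String.ofList (cs.takeWhile pvIsBase), String.ofList [d]] :: pvTokenize r := by
  rw [pvTokenize]; split
  · rename_i hd; rw [h] at hd; exact absurd hd (by simp)
  · rename_i d' r' hd
    rw [h] at hd
    obtain ⟨rfl, rfl⟩ := List.cons.inj hd
    rfl

lemma takeWhile_append_all {p : Char → Bool} {l1 l2 : List Char} (h : ∀ c ∈ l1, p c) :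
    (l1 ++ l2).takeWhile p = l1 ++ l2.takeWhile p := by
  induction l1 with
  | nil => simp
  | cons a t ih =>
    simp [h a (by simp), ih (fun c hc => h c (by simp [hc]))]

lemma dropWhile_append_all {p : Char → Bool} {l1 l2 : List Char} (h : l1.dropWhile p = []) :
    (l1 ++ l2).dropWhile p = l2.dropWhile p := by
  simp [List.dropWhile_append, h]

-- pvTokAux with a pending all-base prefix num is pvTokenize on num.toList ++ cs
lemma tokAux_eq (cs : List Char) (num : String) (hnum : ∀ c ∈ num.toList, pvIsBase c) :
    pvTokAux num cs = pvTokenize (num.toList ++ cs) := by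
  induction cs generalizing num with
  | nil =>
    rw [pvTokAux, List.append_nil, pvTokenize_of_drop_nil]
    exact List.dropWhile_eq_nil_iff.mpr hnum
  | cons c rest ih =>
    by_cases h : pvIsBase c
    · have hnum' : ∀ x ∈ (num.push c).toList, pvIsBase x := by
        intro x hx
        simp only [String.toList_push, List.mem_append, List.mem_singleton] at hx
        rcases hx with hx | rfl
        · exact hnum x hx
        · exact h
      rw [pvTokAux, if_pos h, ih (num.push c) hnum']
      simp
    · rw [pvTokAux, if_neg h, ih "" (by simp)]
      have hdrop : (num.toList ++ c :: rest).dropWhile pvIsBase = c :: rest := by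
        rw [dropWhile_append_all (List.dropWhile_eq_nil_iff.mpr hnum),
          List.dropWhile_cons_of_neg h]
      rw [pvTokenize_of_drop_cons _ c rest hdrop]
      rw [takeWhile_append_all hnum, List.takeWhile_cons_of_neg h]
      simp

-- ===== VERDICT (by name: the statement is the Claim_ definition above) =====
theorem col2parser_spec : Claim_equal_col2parser := by
  intro col2 _
  unfold Spec_col2parser col2parser_alt
  rw [col2parser_eq_foldA, foldA_eq_foldB, foldB_fst, tokAux_eq _ "" (by simp)]
  simp
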